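-- pv_equiv track=rewrite | github.com/DOINYNAM/Baekjoon_Hub | 백준/Silver/13022. 늑대와 올바른 단어/늑대와 올바른 단어.py | is_valid_wolf_sequence
-- ===== SOURCE A (Python) =====
-- def is_valid_wolf_sequence(s):
--     i = 0
--     n = len(s)
--
--     while i < n:
--         # 각 문자의 개수 초기화
--         w_count, o_count, l_count, f_count = 0, 0, 0, 0
--
--         # 'w'의 개수 세기
--         while i < n and s[i] == 'w':
--             w_count += 1
--             i += 1
--         # 'o'의 개수 세기
--         while i < n and s[i] == 'o':
--             o_count += 1
--             i += 1
--         # 'l'의 개수 세기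
--         while i < n and s[i] == 'l':
--             l_count += 1
--             i += 1
--         # 'f'의 개수 세기
--         while i < n and s[i] == 'f':
--             f_count += 1
--             i += 1
--
--         # 검증: 'w', 'o', 'l', 'f'의 개수가 모두 동일해야 함
--         if not (w_count == o_count == l_count == f_count > 0):
--             return 0
--
--         # 'wolf' 패턴이 반복되는 경우를 위해 반복문 계속 진행
--
--     # 모든 검증을 통과했다면, 올바른 'wolf' 패턴
--     return 1
-- ===== SOURCE B (Python) =====
-- def is_valid_wolf_sequence(s):
--     # run-length decompose, then validate quartets of runs
--     runs = []
--     for ch in s: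
--         if runs and runs[-1][0] == ch:
--             runs[-1][1] += 1
--         else:
--             runs.append([ch, 1])
--     if len(runs) % 4 != 0:
--         return 0
--     for i in range(0, len(runs), 4):
--         (c0, n0), (c1, n1), (c2, n2), (c3, n3) = runs[i:i+4]
--         if (c0, c1, c2, c3) != ('w', 'o', 'l', 'f') or not (n0 == n1 == n2 == n3):
--             return 0
--     return 1
-- ===== Notes on version B (the rewrite author's own statement) =====
-- stated objective: idiomatic
-- what changed: replaces the nested index-walking while loops with a run-length decomposition of the string followed by a quartet check over the list of runs
import Mathlib
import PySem

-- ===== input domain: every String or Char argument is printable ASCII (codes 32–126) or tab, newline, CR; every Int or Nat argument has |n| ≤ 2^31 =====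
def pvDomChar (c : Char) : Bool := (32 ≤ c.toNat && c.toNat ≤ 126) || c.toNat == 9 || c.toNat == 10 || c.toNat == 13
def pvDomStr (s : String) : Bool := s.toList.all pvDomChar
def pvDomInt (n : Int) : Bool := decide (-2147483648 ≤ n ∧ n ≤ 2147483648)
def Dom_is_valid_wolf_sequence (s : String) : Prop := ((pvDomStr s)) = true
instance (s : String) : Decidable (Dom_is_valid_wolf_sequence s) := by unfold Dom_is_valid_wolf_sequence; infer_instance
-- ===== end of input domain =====

-- B replaces A's nested index-walking while loops by a run-length decomposition of the
-- string followed by a quartet check over the runs list (a different decomposition, same cost).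


-- ===== PORT A =====
def pvRunW (cs : List Char) (c : Char) : Nat × List Char :=
  match cs with
  | [] => (0, [])
  | x :: rest =>
    if x = c then ((pvRunW rest c).1 + 1, (pvRunW rest c).2)
    else (0, x :: rest)

theorem pvRunW_len (cs : List Char) (c : Char) :
    (pvRunW cs c).1 + (pvRunW cs c).2.length = cs.length := by
  induction cs with
  | nil => simp [pvRunW]
  | cons x rest ih =>
    by_cases h : x = c <;> simp [pvRunW, h] <;> omega

def pvLoopA (cs : List Char) : Int :=
  match cs with
  | [] => 1
  | x :: rest =>
    let r1 := pvRunW (x :: rest) 'w'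
    let r2 := pvRunW r1.2 'o'
    let r3 := pvRunW r2.2 'l'
    let r4 := pvRunW r3.2 'f'
    if h : r1.1 = r2.1 ∧ r2.1 = r3.1 ∧ r3.1 = r4.1 ∧ 0 < r4.1 then pvLoopA r4.2 else 0
termination_by cs.length
decreasing_by
  simp only [r1, r2, r3, r4] at h ⊢
  have h1 := pvRunW_len (x :: rest) 'w'
  have h2 := pvRunW_len (pvRunW (x :: rest) 'w').2 'o'
  have h3 := pvRunW_len (pvRunW (pvRunW (x :: rest) 'w').2 'o').2 'l'
  have h4 := pvRunW_len (pvRunW (pvRunW (pvRunW (x :: rest) 'w').2 'o').2 'l').2 'f'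
  simp only [List.length_cons] at *
  omega

def is_valid_wolf_sequence (s : String) : Int := pvLoopA s.toList

-- ===== PORT B =====
def pvPushRun : List (Char × Nat) → Char → List (Char × Nat)
  | [], ch => [(ch, 1)]
  | [(c, k)], ch => if c = ch then [(c, k + 1)] else [(c, k), (ch, 1)]
  | x :: y :: xs, ch => x :: pvPushRun (y :: xs) ch

def pvCheckRuns : List (Char × Nat) → Int
  | [] => 1
  | (c0, n0) :: (c1, n1) :: (c2, n2) :: (c3, n3) :: rest =>
    if c0 = 'w' ∧ c1 = 'o' ∧ c2 = 'l' ∧ c3 = 'f' ∧ n0 = n1 ∧ n1 = n2 ∧ n2 = n3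
    then pvCheckRuns rest else 0
  | _ => 0

def is_valid_wolf_sequence_alt (s : String) : Int :=
  let runs := s.toList.foldl pvPushRun []
  if runs.length % 4 ≠ 0 then 0 else pvCheckRuns runs

-- ===== PRECONDITION & SPEC =====
def Spec_is_valid_wolf_sequence (s : String) (out : Int) : Prop := out = is_valid_wolf_sequence_alt s
instance (s : String) (out : Int) : Decidable (Spec_is_valid_wolf_sequence s out) := by unfold Spec_is_valid_wolf_sequence; infer_instance

-- ===== CLAIM (what is proved, stated in full; the proofs are below) =====
def Claim_equal_is_valid_wolf_sequence : Prop := ∀ (s : String), Dom_is_valid_wolf_sequence s → Spec_is_valid_wolf_sequence s (is_valid_wolf_sequence s)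

-- ===== LEMMAS AND PROOFS =====

def runsOf : List Char → List (Char × Nat)
  | [] => []
  | c :: cs =>
    match runsOf cs with
    | [] => [(c, 1)]
    | (c', k) :: rs => if c = c' then (c, k + 1) :: rs else (c, 1) :: (c', k) :: rs

def glue : List (Char × Nat) → List (Char × Nat) → List (Char × Nat)
  | [], ys => ys
  | [(c, k)], ys =>
    match ys with
    | [] => [(c, k)]
    | (c', m) :: yt => if c' = c then (c, k + m) :: yt else (c, k) :: (c', m) :: yt
  | x :: y :: xs, ys => x :: glue (y :: xs) ys

theorem pushRun_eq_glue (rs : List (Char × Nat)) (c : Char) :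
    pvPushRun rs c = glue rs [(c, 1)] := by
  induction rs with
  | nil => rfl
  | cons x xs ih =>
    cases xs with
    | nil =>
      obtain ⟨c0, k0⟩ := x
      by_cases h : c0 = c <;> simp [pvPushRun, glue, h]
      · intro hc; exact absurd hc.symm h
    | cons y ys => simpa [pvPushRun, glue] using ih

theorem glue_ne_nil (xs ys : List (Char × Nat)) (h : xs ≠ []) : glue xs ys ≠ [] := by
  cases xs with
  | nil => exact absurd rfl h
  | cons x xt =>
    cases xt with
    | nil =>
      obtain ⟨c, k⟩ := x
      cases ys with
      | nil => simp [glue]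
      | cons y yt => obtain ⟨c', m⟩ := y; by_cases hc : c' = c <;> simp [glue, hc]
    | cons y yt => simp [glue]

theorem glue_assoc_single (rs zs : List (Char × Nat)) (c : Char) :
    glue (glue rs [(c, 1)]) zs = glue rs (glue [(c, 1)] zs) := by
  induction rs with
  | nil => rfl
  | cons x xs ih =>
    obtain ⟨c0, k0⟩ := x
    cases xs with
    | nil =>
      by_cases h : c = c0
      · subst h
        simp [glue]
        cases zs with
        | nil => simp [glue]
        | cons z zt =>
          obtain ⟨cz, m⟩ := z
          by_cases hz : cz = c <;> simp [glue, hz] <;> omega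
      · simp [glue, h]
        cases zs with
        | nil => simp [glue, h, Ne.symm h]
        | cons z zt =>
          obtain ⟨cz, m⟩ := z
          by_cases hz : cz = c <;> simp [glue, hz, h, Ne.symm h]
    | cons y ys =>
      have hne : glue (y :: ys) [(c, 1)] ≠ [] := glue_ne_nil _ _ (by simp)
      cases hg : glue (y :: ys) [(c, 1)] with
      | nil => exact absurd hg hne
      | cons g gt =>
        simp only [glue, hg]
        rw [← hg, ih]
        rfl

theorem runsOf_cons (c : Char) (cs : List Char) :
    runsOf (c :: cs) = glue [(c, 1)] (runsOf cs) := by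
  cases h : runsOf cs with
  | nil => simp [runsOf, h, glue]
  | cons r rt =>
    obtain ⟨c', k⟩ := r
    by_cases hc : c = c'
    · subst hc; simp [runsOf, h, glue, Nat.add_comm]
    · simp [runsOf, h, glue, hc, Ne.symm hc]

theorem foldl_pushRun (cs : List Char) : ∀ rs : List (Char × Nat),
    List.foldl pvPushRun rs cs = glue rs (runsOf cs) := by
  induction cs with
  | nil =>
    intro rs
    cases rs with
    | nil => rfl
    | cons x xt =>
      cases xt with
      | nil => obtain ⟨c, k⟩ := x; simp [runsOf, glue]
      | cons y yt =>
        simp only [List.foldl_nil, runsOf]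
        induction yt generalizing x y with
        | nil => obtain ⟨c, k⟩ := y; simp [glue]
        | cons z zt ih2 => simp [glue, ih2]
  | cons c ct ih =>
    intro rs
    simp only [List.foldl_cons]
    rw [ih, pushRun_eq_glue, glue_assoc_single, ← runsOf_cons]

theorem runsOf_pos (cs : List Char) : ∀ p ∈ runsOf cs, 1 ≤ p.2 := by
  induction cs with
  | nil => simp [runsOf]
  | cons c ct ih =>
    intro p hp
    cases h : runsOf ct with
    | nil =>
      have hrw : runsOf (c :: ct) = [(c, 1)] := by simp [runsOf, h]
      rw [hrw] at hp; simp at hp; simp [hp]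
    | cons r rt =>
      obtain ⟨c', k⟩ := r
      have hk : 1 ≤ k := ih (c', k) (by rw [h]; exact List.mem_cons_self ..)
      have hrt : ∀ q ∈ rt, 1 ≤ q.2 := fun q hq => ih q (by rw [h]; exact List.mem_cons_of_mem _ hq)
      have hrw : runsOf (c :: ct) =
          if c = c' then (c, k + 1) :: rt else (c, 1) :: (c', k) :: rt := by
        simp [runsOf, h]
      rw [hrw] at hp
      by_cases hc : c = c'
      · rw [if_pos hc] at hp
        rcases List.mem_cons.1 hp with h1 | h1
        · subst h1; simp
        · exact hrt _ h1
      · rw [if_neg hc] at hp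
        rcases List.mem_cons.1 hp with h1 | h1
        · subst h1; simp
        · rcases List.mem_cons.1 h1 with h2 | h2
          · subst h2; exact hk
          · exact hrt _ h2

theorem runsOf_eq_nil_iff (cs : List Char) : runsOf cs = [] ↔ cs = [] := by
  cases cs with
  | nil => simp [runsOf]
  | cons c ct =>
    simp only [runsOf]
    cases h : runsOf ct with
    | nil => simp
    | cons r rt => obtain ⟨c', k⟩ := r; by_cases hc : c = c' <;> simp [hc]

def take1 (c : Char) : List (Char × Nat) → Nat × List (Char × Nat)
  | [] => (0, [])
  | (c', k) :: rs => if c' = c then (k, rs) else (0, (c', k) :: rs)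

theorem runW_take1 (cs : List Char) (c : Char) :
    (pvRunW cs c).1 = (take1 c (runsOf cs)).1 ∧
    runsOf (pvRunW cs c).2 = (take1 c (runsOf cs)).2 := by
  induction cs with
  | nil => simp [pvRunW, runsOf, take1]
  | cons x rest ih =>
    cases h : runsOf rest with
    | nil =>
      have hrest : rest = [] := (runsOf_eq_nil_iff rest).1 h
      subst hrest
      by_cases hx : x = c
      · subst hx; simp [pvRunW, runsOf, take1]
      · simp [pvRunW, runsOf, take1, hx, Ne.symm hx]
    | cons r rt =>
      obtain ⟨c', k⟩ := r
      have h1 := ih.1; have h2 := ih.2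
      rw [h] at h1 h2
      have hrw : runsOf (x :: rest) =
          if x = c' then (x, k + 1) :: rt else (x, 1) :: (c', k) :: rt := by
        simp [runsOf, h]
      by_cases hx : x = c
      · subst hx
        by_cases hc : x = c'
        · have hc'c : c' = x := hc.symm
          simp only [take1, if_pos hc'c] at h1 h2
          rw [if_pos hc] at hrw
          refine ⟨?_, ?_⟩ <;> simp [pvRunW, hrw, take1, h1, h2]
        · have hne : ¬ c' = x := fun hh => hc hh.symm
          simp only [take1, if_neg hne] at h1 h2
          rw [if_neg hc] at hrw
          refine ⟨?_, ?_⟩ <;> simp [pvRunW, hrw, take1, h1, h2]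
      · have hne : ¬ x = c := hx
        by_cases hc : x = c'
        · rw [if_pos hc] at hrw
          refine ⟨?_, ?_⟩ <;> simp [pvRunW, hrw, take1, hne, Ne.symm hne]
        · rw [if_neg hc] at hrw
          refine ⟨?_, ?_⟩ <;> simp [pvRunW, hrw, take1, hne, Ne.symm hne]

theorem take1_len (c : Char) (rs : List (Char × Nat)) :
    (take1 c rs).2.length ≤ rs.length := by
  cases rs with
  | nil => simp [take1]
  | cons r rt => obtain ⟨c', k⟩ := r; by_cases h : c' = c <;> simp [take1, h]

def loopR (rs : List (Char × Nat)) : Int :=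
  match rs with
  | [] => 1
  | x :: rest =>
    let t1 := take1 'w' (x :: rest)
    let t2 := take1 'o' t1.2
    let t3 := take1 'l' t2.2
    let t4 := take1 'f' t3.2
    if h : t1.1 = t2.1 ∧ t2.1 = t3.1 ∧ t3.1 = t4.1 ∧ 0 < t4.1 then loopR t4.2 else 0
termination_by rs.length
decreasing_by
  simp only [t1, t2, t3, t4] at h ⊢
  obtain ⟨h1, h2, h3, h4⟩ := h
  have hw : 0 < (take1 'w' (x :: rest)).1 := by omega
  have hwlen : (take1 'w' (x :: rest)).2.length < (x :: rest).length := by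
    obtain ⟨cx, kx⟩ := x
    by_cases hh : cx = 'w' <;> simp [take1, hh] at hw ⊢
  have l2 := take1_len 'o' (take1 'w' (x :: rest)).2
  have l3 := take1_len 'l' (take1 'o' (take1 'w' (x :: rest)).2).2
  have l4 := take1_len 'f' (take1 'l' (take1 'o' (take1 'w' (x :: rest)).2).2).2
  simp only [List.length_cons] at *
  omega

theorem loopA_eq_loopR (n : Nat) : ∀ cs : List Char, cs.length ≤ n →
    pvLoopA cs = loopR (runsOf cs) := by
  induction n with
  | zero =>
    intro cs h
    have : cs = [] := by cases cs <;> simp at h ⊢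
    subst this
    simp [pvLoopA, runsOf, loopR]
  | succ n ih =>
    intro cs hlen
    cases cs with
    | nil => simp [pvLoopA, runsOf, loopR]
    | cons x rest =>
      obtain ⟨w1, w2⟩ := runW_take1 (x :: rest) 'w'
      obtain ⟨o1, o2⟩ := runW_take1 (pvRunW (x :: rest) 'w').2 'o'
      rw [w2] at o1 o2
      obtain ⟨l1, l2⟩ := runW_take1 (pvRunW (pvRunW (x :: rest) 'w').2 'o').2 'l'
      rw [o2] at l1 l2
      obtain ⟨f1, f2⟩ := runW_take1 (pvRunW (pvRunW (pvRunW (x :: rest) 'w').2 'o').2 'l').2 'f'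
      rw [l2] at f1 f2
      cases hr : runsOf (x :: rest) with
      | nil => exact absurd ((runsOf_eq_nil_iff _).1 hr) (by simp)
      | cons rr rt =>
        rw [pvLoopA, loopR, ← hr]
        rw [w1, o1, l1, f1]
        split
        next hG =>
          rw [← f2]
          apply ih
          obtain ⟨h1, h2, h3, h4⟩ := hG
          have hw : 0 < (pvRunW (x :: rest) 'w').1 := by rw [w1]; omega
          have L1 := pvRunW_len (x :: rest) 'w'
          have L2 := pvRunW_len (pvRunW (x :: rest) 'w').2 'o'
          have L3 := pvRunW_len (pvRunW (pvRunW (x :: rest) 'w').2 'o').2 'l'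
          have L4 := pvRunW_len (pvRunW (pvRunW (pvRunW (x :: rest) 'w').2 'o').2 'l').2 'f'
          simp only [List.length_cons] at *
          omega
        next => rfl

theorem checkRuns_mod (n : Nat) : ∀ rs : List (Char × Nat), rs.length ≤ n →
    rs.length % 4 ≠ 0 → pvCheckRuns rs = 0 := by
  induction n with
  | zero =>
    intro rs h hm
    cases rs with
    | nil => simp at hm
    | cons r rt => simp at h
  | succ n ih =>
    intro rs h hm
    match rs with
    | [] => simp at hm
    | [(c0, n0)] => rfl
    | [(c0, n0), (c1, n1)] => rfl
    | [(c0, n0), (c1, n1), (c2, n2)] => rfl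
    | (c0, n0) :: (c1, n1) :: (c2, n2) :: (c3, n3) :: rest =>
      rw [pvCheckRuns]
      split
      next hc =>
        apply ih
        · simp at h ⊢; omega
        · simp at hm ⊢; omega
      next => rfl

theorem take1_pos (c : Char) (rs : List (Char × Nat)) (h : 0 < (take1 c rs).1) :
    (take1 c rs).2.length + 1 ≤ rs.length := by
  cases rs with
  | nil => simp [take1] at h
  | cons r rt =>
    obtain ⟨c', k⟩ := r
    by_cases hc : c' = c <;> simp [take1, hc] at h ⊢

theorem loopR_eq_checkRuns (n : Nat) : ∀ rs : List (Char × Nat), rs.length ≤ n →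
    (∀ p ∈ rs, 1 ≤ p.2) → loopR rs = pvCheckRuns rs := by
  induction n with
  | zero =>
    intro rs h _
    cases rs with
    | nil => rw [loopR]; rfl
    | cons r rt => simp at h
  | succ n ih =>
    intro rs hlen hpos
    match rs with
    | [] => rw [loopR]; rfl
    | [(c0, k0)] =>
      rw [loopR]
      split
      next hG =>
        exfalso
        obtain ⟨g1, g2, g3, g4⟩ := hG
        have h1 : 0 < (take1 'w' [(c0, k0)]).1 := by omega
        have p1 := take1_pos 'w' [(c0, k0)] h1
        have h2 : 0 < (take1 'o' (take1 'w' [(c0, k0)]).2).1 := by omega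
        have p2 := take1_pos 'o' _ h2
        have p3 := take1_pos 'l' _ (by omega : 0 < (take1 'l' (take1 'o' (take1 'w' [(c0, k0)]).2).2).1)
        have p4 := take1_pos 'f' _ (by omega : 0 < (take1 'f' (take1 'l' (take1 'o' (take1 'w' [(c0, k0)]).2).2).2).1)
        simp only [List.length_cons, List.length_nil] at p1
        omega
      next => rfl
    | [(c0, k0), (c1, k1)] =>
      rw [loopR]
      split
      next hG =>
        exfalso
        obtain ⟨g1, g2, g3, g4⟩ := hG
        have p1 := take1_pos 'w' [(c0, k0), (c1, k1)] (by omega)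
        have p2 := take1_pos 'o' _ (by omega : 0 < (take1 'o' (take1 'w' [(c0, k0), (c1, k1)]).2).1)
        have p3 := take1_pos 'l' _ (by omega : 0 < (take1 'l' (take1 'o' (take1 'w' [(c0, k0), (c1, k1)]).2).2).1)
        have p4 := take1_pos 'f' _ (by omega : 0 < (take1 'f' (take1 'l' (take1 'o' (take1 'w' [(c0, k0), (c1, k1)]).2).2).2).1)
        simp only [List.length_cons, List.length_nil] at p1
        omega
      next => rfl
    | [(c0, k0), (c1, k1), (c2, k2)] =>
      rw [loopR]
      split
      next hG =>
        exfalso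
        obtain ⟨g1, g2, g3, g4⟩ := hG
        have p1 := take1_pos 'w' [(c0, k0), (c1, k1), (c2, k2)] (by omega)
        have p2 := take1_pos 'o' _ (by omega : 0 < (take1 'o' (take1 'w' [(c0, k0), (c1, k1), (c2, k2)]).2).1)
        have p3 := take1_pos 'l' _ (by omega : 0 < (take1 'l' (take1 'o' (take1 'w' [(c0, k0), (c1, k1), (c2, k2)]).2).2).1)
        have p4 := take1_pos 'f' _ (by omega : 0 < (take1 'f' (take1 'l' (take1 'o' (take1 'w' [(c0, k0), (c1, k1), (c2, k2)]).2).2).2).1)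
        simp only [List.length_cons, List.length_nil] at p1
        omega
      next => rfl
    | (c0, k0) :: (c1, k1) :: (c2, k2) :: (c3, k3) :: rest =>
      have hk0 : 1 ≤ k0 := hpos (c0, k0) (by simp)
      have hk1 : 1 ≤ k1 := hpos (c1, k1) (by simp)
      have hk2 : 1 ≤ k2 := hpos (c2, k2) (by simp)
      have hk3 : 1 ≤ k3 := hpos (c3, k3) (by simp)
      rw [loopR, pvCheckRuns]
      by_cases h0 : c0 = 'w'
      · subst h0
        by_cases h1 : c1 = 'o'
        · subst h1
          by_cases h2 : c2 = 'l'
          · subst h2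
            by_cases h3 : c3 = 'f'
            · subst h3
              have hrec : loopR rest = pvCheckRuns rest := by
                apply ih rest
                · simp only [List.length_cons] at hlen; omega
                · exact fun p hp => hpos p (by simp [hp])
              by_cases hg : k0 = k1 ∧ k1 = k2 ∧ k2 = k3
              · have hgt : 0 < k3 := by omega
                simp [take1, hg, hgt, hrec, hg.1, hg.2.1, hg.2.2]
              · have hng : ¬ (k0 = k1 ∧ k1 = k2 ∧ k2 = k3 ∧ 0 < k3) :=
                  fun h => hg ⟨h.1, h.2.1, h.2.2.1⟩
                simp [take1, hng, hg]
            · split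
              next hG => exfalso; simp [take1, h3] at hG
              next => rw [if_neg]; simp [h3]
          · split
            next hG => exfalso; simp [take1, h2] at hG; omega
            next => rw [if_neg]; simp [h2]
        · split
          next hG => exfalso; simp [take1, h1] at hG; omega
          next => rw [if_neg]; simp [h1]
      · split
        next hG => exfalso; simp [take1, h0] at hG; omega
        next => rw [if_neg]; simp [h0]

-- ===== VERDICT (by name: the statement is the Claim_ definition above) =====
theorem is_valid_wolf_sequence_spec : Claim_equal_is_valid_wolf_sequence := by
  intro s _
  unfold Spec_is_valid_wolf_sequence is_valid_wolf_sequence is_valid_wolf_sequence_alt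
  have hruns : s.toList.foldl pvPushRun [] = runsOf s.toList := by
    rw [foldl_pushRun]; rfl
  rw [hruns, loopA_eq_loopR s.toList.length s.toList le_rfl,
      loopR_eq_checkRuns (runsOf s.toList).length _ le_rfl (runsOf_pos _)]
  by_cases h : (runsOf s.toList).length % 4 = 0
  · simp [h]
  · simp [h, checkRuns_mod (runsOf s.toList).length _ le_rfl h]
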